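-- pv_equiv track=rewrite | github.com/CardinisCode/learning-python | finalproblem9.py | find_type_with_highest_avg_speed
-- ===== SOURCE A (Python) =====
-- def find_type_with_highest_avg_speed(type_dict_with_speed_and_occurences):
--     type_with_highest_avg_speed = None
--     highest_avg_speed = None
--
--     for pokemon_type in type_dict_with_speed_and_occurences.keys():
--         total_speed = type_dict_with_speed_and_occurences[pokemon_type]["Total Speed"]
--         total_occurences = type_dict_with_speed_and_occurences[pokemon_type]["Total Occurences"]
--         average_speed = round(total_speed / total_occurences)
--
--         if highest_avg_speed == None:
--             highest_avg_speed = average_speed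
--             type_with_highest_avg_speed = pokemon_type
--
--         elif average_speed > highest_avg_speed:
--             highest_avg_speed = average_speed
--             type_with_highest_avg_speed = pokemon_type
--
--     return (type_with_highest_avg_speed, highest_avg_speed)
-- ===== SOURCE B (Python) =====
-- def find_type_with_highest_avg_speed(type_dict_with_speed_and_occurences):
--     d = type_dict_with_speed_and_occurences
--     if not d:
--         return (None, None)
--
--     def avg(pokemon_type):
--         entry = d[pokemon_type]
--         return round(entry["Total Speed"] / entry["Total Occurences"])
--
--     ranking = sorted(d, key=avg, reverse=True)
--     best = ranking[0]
--     return (best, avg(best))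
-- ===== Notes on version B (the rewrite author's own statement) =====
-- stated objective: alternative
-- what changed: Replaces the one-pass sentinel argmax scan with an empty-dict guard plus a stable descending sort of the keys by rounded average speed, taking the head of the ranking (sort stability preserves the first-of-ties winner).
import Mathlib
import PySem

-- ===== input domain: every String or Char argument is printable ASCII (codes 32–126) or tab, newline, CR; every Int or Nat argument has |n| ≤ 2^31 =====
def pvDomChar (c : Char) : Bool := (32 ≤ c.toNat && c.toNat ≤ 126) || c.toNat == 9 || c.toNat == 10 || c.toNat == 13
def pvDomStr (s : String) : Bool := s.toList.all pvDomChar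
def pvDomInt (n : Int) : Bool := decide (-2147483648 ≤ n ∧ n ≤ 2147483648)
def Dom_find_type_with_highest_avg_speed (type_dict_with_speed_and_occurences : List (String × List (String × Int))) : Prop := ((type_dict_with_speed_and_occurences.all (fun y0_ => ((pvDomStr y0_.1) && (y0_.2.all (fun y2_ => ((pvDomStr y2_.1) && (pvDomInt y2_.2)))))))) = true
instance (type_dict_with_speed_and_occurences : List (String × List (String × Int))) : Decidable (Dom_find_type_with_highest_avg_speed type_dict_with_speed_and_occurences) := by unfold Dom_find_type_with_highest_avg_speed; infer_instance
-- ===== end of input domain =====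

-- B replaces A's one-pass sentinel argmax scan by an empty-guard plus a stable descending
-- sort of the keys by rounded average, taking the head of the ranking; same results, not faster.

-- Shared primitive: Python's round(a / b) for ints a, b (b ≠ 0 under Pre_): banker's rounding of
-- the exact rational a/b.  Exact w.r.t. CPython's float division + round on the Dom range
-- (|a|, |b| ≤ 2^31), where the float cannot cross a half-integer boundary except at exact ties.
def pvRound2 (a b : Int) : Int :=
  let s := if b < 0 then (-a, -b) else (a, b)
  let t := 2 * s.1
  let q := PySem.Int.floordiv t s.2
  let r := PySem.Int.mod t s.2
  if r = 0 then
    if PySem.Int.mod q 2 = 0 then PySem.Int.floordiv q 2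
    else
      let h := PySem.Int.floordiv (q - 1) 2
      if PySem.Int.mod h 2 = 0 then h else h + 1
  else PySem.Int.floordiv (t + s.2) (2 * s.2)

-- ===== PORT A =====
def find_type_with_highest_avg_speed (type_dict_with_speed_and_occurences : List (String × List (String × Int))) : Option String × Option Int :=
  let d := PySem.Dict.ofList type_dict_with_speed_and_occurences
  d.keys.foldl
    (fun (st : Option String × Option Int) pokemon_type =>
      let inner := PySem.Dict.ofList (d.getD pokemon_type [])
      let total_speed := inner.getD "Total Speed" 0
      let total_occurences := inner.getD "Total Occurences" 0
      let average_speed := pvRound2 total_speed total_occurences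
      match st.2 with
      | none => (some pokemon_type, some average_speed)
      | some highest_avg_speed =>
          if highest_avg_speed < average_speed then (some pokemon_type, some average_speed) else st)
    (none, none)

-- ===== PORT B =====
-- Source B's local helper avg(t)
def pvAvg (d : PySem.Dict String (List (String × Int))) (pokemon_type : String) : Int :=
  let entry := PySem.Dict.ofList (d.getD pokemon_type [])
  pvRound2 (entry.getD "Total Speed" 0) (entry.getD "Total Occurences" 0)

def find_type_with_highest_avg_speed_alt (type_dict_with_speed_and_occurences : List (String × List (String × Int))) : Option String × Option Int :=
  let d := PySem.Dict.ofList type_dict_with_speed_and_occurences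
  if d.items = [] then (none, none)
  else
    match PySem.List.sorted d.keys (pvAvg d) true with
    | [] => (none, none)   -- unreachable: d is non-empty, so ranking[0] exists
    | best :: _ => (some best, some (pvAvg d best))

-- ===== PRECONDITION & SPEC =====
-- Pre_ excludes exactly the inputs where Python A raises: a type whose record lacks
-- "Total Speed" or "Total Occurences" (KeyError) or has zero occurrences (ZeroDivisionError).
def Pre_find_type_with_highest_avg_speed (type_dict_with_speed_and_occurences : List (String × List (String × Int))) : Prop :=
  ∀ p ∈ (PySem.Dict.ofList type_dict_with_speed_and_occurences).items,
    (PySem.Dict.ofList p.2).contains "Total Speed" = true ∧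
    (PySem.Dict.ofList p.2).contains "Total Occurences" = true ∧
    (PySem.Dict.ofList p.2).getD "Total Occurences" 0 ≠ 0
instance (type_dict_with_speed_and_occurences : List (String × List (String × Int))) : Decidable (Pre_find_type_with_highest_avg_speed type_dict_with_speed_and_occurences) := by unfold Pre_find_type_with_highest_avg_speed; infer_instance

def pvWitness_find_type_with_highest_avg_speed : (List (String × List (String × Int))) :=
  [("Fire", [("Total Speed", 10), ("Total Occurences", 3)]),
   ("Water", [("Total Speed", 7), ("Total Occurences", 2)])]

def Spec_find_type_with_highest_avg_speed (type_dict_with_speed_and_occurences : List (String × List (String × Int))) (out : Option String × Option Int) : Prop := out = find_type_with_highest_avg_speed_alt type_dict_with_speed_and_occurences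
instance (type_dict_with_speed_and_occurences : List (String × List (String × Int))) (out : Option String × Option Int) : Decidable (Spec_find_type_with_highest_avg_speed type_dict_with_speed_and_occurences out) := by unfold Spec_find_type_with_highest_avg_speed; infer_instance

-- ===== CLAIM (what is proved, stated in full; the proofs are below) =====
def Claim_equal_find_type_with_highest_avg_speed : Prop := ∀ (type_dict_with_speed_and_occurences : List (String × List (String × Int))), Dom_find_type_with_highest_avg_speed type_dict_with_speed_and_occurences → Pre_find_type_with_highest_avg_speed type_dict_with_speed_and_occurences → Spec_find_type_with_highest_avg_speed type_dict_with_speed_and_occurences (find_type_with_highest_avg_speed type_dict_with_speed_and_occurences)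

-- ===== LEMMAS AND PROOFS =====

-- proof helper: the running first-argmax step
def pvArgmaxStep {α : Type} (key : α → Int) (st : Option α) (x : α) : Option α :=
  match st with
  | none => some x
  | some m => if key m < key x then some x else some m

-- head of a stable descending insertion step
theorem head?_insertBy {α : Type} (key : α → Int) (x : α) (ys : List α) :
    (PySem.List.insertBy (fun a b => decide (key b < key a)) x ys).head? =
      (match ys.head? with
       | none => some x
       | some y => if key y < key x then some x else some y) := by
  cases ys with
  | nil => simp [PySem.List.insertBy]
  | cons y t =>
    simp only [PySem.List.insertBy, List.head?_cons]
    by_cases h : key y < key x <;> simp [h]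

-- the head of the insertion-sort fold is the running first-argmax state
theorem foldl_insertBy_head? {α : Type} (key : α → Int) (xs : List α) (acc : List α) :
    ((xs.foldl (fun acc x => PySem.List.insertBy (fun a b => decide (key b < key a)) x acc) acc).head?)
      = xs.foldl
          (fun st x =>
            match st with
            | none => some x
            | some m => if key m < key x then some x else some m)
          acc.head? := by
  induction xs generalizing acc with
  | nil => rfl
  | cons x t ih =>
    simp only [List.foldl_cons]
    rw [ih, head?_insertBy]

-- head of sorted(xs, key, reverse=True) is the first-argmax fold over the keys
theorem sorted_rev_head? {α : Type} (xs : List α) (key : α → Int) :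
    (PySem.List.sorted xs key true).head? =
      xs.foldl (pvArgmaxStep key) none := by
  rw [PySem.List.sorted_rev_eq_foldl_insertBy]
  have h := foldl_insertBy_head? key xs []
  simp only [List.head?_nil] at h
  rw [h]
  rfl

-- A's scan, expressed through the same first-argmax fold
theorem a_fold_eq (d : PySem.Dict String (List (String × Int))) :
    (d.keys.foldl
      (fun (st : Option String × Option Int) pokemon_type =>
        let inner := PySem.Dict.ofList (d.getD pokemon_type [])
        let total_speed := inner.getD "Total Speed" 0
        let total_occurences := inner.getD "Total Occurences" 0
        let average_speed := pvRound2 total_speed total_occurences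
        match st.2 with
        | none => (some pokemon_type, some average_speed)
        | some highest_avg_speed =>
            if highest_avg_speed < average_speed then (some pokemon_type, some average_speed) else st)
      (none, none))
    = (match d.keys.foldl (pvArgmaxStep (pvAvg d)) none with
       | none => ((none : Option String), (none : Option Int))
       | some m => (some m, some (pvAvg d m))) := by
  have h := List.foldl_hom
    (f := fun (st : Option String) =>
      (match st with
       | none => ((none : Option String), (none : Option Int))
       | some m => (some m, some (pvAvg d m))))
    (g₁ := pvArgmaxStep (pvAvg d))
    (g₂ := fun (st : Option String × Option Int) pokemon_type =>
      let inner := PySem.Dict.ofList (d.getD pokemon_type [])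
      let total_speed := inner.getD "Total Speed" 0
      let total_occurences := inner.getD "Total Occurences" 0
      let average_speed := pvRound2 total_speed total_occurences
      match st.2 with
      | none => (some pokemon_type, some average_speed)
      | some highest_avg_speed =>
          if highest_avg_speed < average_speed then (some pokemon_type, some average_speed) else st)
    (l := d.keys) (init := (none : Option String))
    (by
      intro st x
      cases st with
      | none => rfl
      | some m =>
        simp only [pvAvg, pvArgmaxStep]
        split_ifs <;> rfl)
  simpa only [] using h

-- ===== VERDICT (by name: the statement is the Claim_ definition above) =====
theorem find_type_with_highest_avg_speed_spec : Claim_equal_find_type_with_highest_avg_speed := by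
  intro l _hDom _hPre
  unfold Spec_find_type_with_highest_avg_speed
  unfold find_type_with_highest_avg_speed find_type_with_highest_avg_speed_alt
  simp only []
  set d := PySem.Dict.ofList l with hd
  rw [a_fold_eq d]
  by_cases hit : d.items = []
  · have hk : d.keys = [] := by simp [PySem.Dict.keys, hit]
    simp [hit, hk]
  · rw [if_neg hit]
    have hh := (sorted_rev_head? d.keys (pvAvg d)).symm
    cases hs : PySem.List.sorted d.keys (pvAvg d) true with
    | nil =>
      rw [hs] at hh
      rw [hh]
      rfl
    | cons best rest =>
      rw [hs] at hh
      rw [hh]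
      rfl
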